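-- pv_equiv track=rewrite | github.com/yalyazzat/Web-Dev | lab 7/lab 7/informatics/codingBat/logic1/caught_speeding.py | caught_speeding
-- ===== SOURCE A (Python) =====
-- def caught_speeding(speed, is_birthday):
--   if(not is_birthday):
--     if(speed <= 60):
--       return 0
--     elif(speed <= 80):
--       return 1
--     else:
--       return 2
--   else:
--     return caught_speeding(speed - 5, False)
-- ===== SOURCE B (Python) =====
-- def caught_speeding(speed, is_birthday):
--     # Branchless: ticket level = number of limits (60, 80) strictly exceeded
--     # by the birthday-adjusted speed. No if/else cascade, no recursion.
--     s = speed - 5 * is_birthday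
--     return (s > 60) + (s > 80)
-- ===== Notes on version B (the rewrite author's own statement) =====
-- stated objective: alternative
-- what changed: Replaces A's recursive branch cascade with a branchless arithmetic formula: the result is computed as the count of thresholds (60, 80) exceeded by the birthday-adjusted speed, summing two boolean comparisons with no conditional at all.
import Mathlib
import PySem

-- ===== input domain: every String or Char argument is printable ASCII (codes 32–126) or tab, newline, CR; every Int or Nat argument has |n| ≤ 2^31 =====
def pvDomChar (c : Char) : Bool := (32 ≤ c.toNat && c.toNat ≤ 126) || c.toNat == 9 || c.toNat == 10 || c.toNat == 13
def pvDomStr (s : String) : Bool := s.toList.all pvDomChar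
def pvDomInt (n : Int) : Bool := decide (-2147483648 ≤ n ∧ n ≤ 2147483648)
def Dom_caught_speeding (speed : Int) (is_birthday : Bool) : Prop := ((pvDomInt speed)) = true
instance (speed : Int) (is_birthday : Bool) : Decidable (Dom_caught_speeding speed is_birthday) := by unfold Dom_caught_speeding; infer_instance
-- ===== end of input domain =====

-- B replaces A's recursive branch cascade with a branchless count of exceeded thresholds (alternative formulation).

-- ===== PORT A =====
-- A recurses once when is_birthday; ported with Bool recursion (birthday call passes false).
def caught_speeding (speed : Int) (is_birthday : Bool) : Int :=
  match is_birthday with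
  | false => if speed ≤ 60 then 0 else if speed ≤ 80 then 1 else 2
  | true => caught_speeding (speed - 5) false
termination_by (if is_birthday then 1 else 0)
decreasing_by simp

-- ===== PORT B =====
-- Source B: s = speed - 5 * is_birthday; return (s > 60) + (s > 80)  (Python bools add as 0/1)
def caught_speeding_alt (speed : Int) (is_birthday : Bool) : Int :=
  let s : Int := speed - 5 * (if is_birthday then (1 : Int) else 0)
  ((decide (s > 60)).toNat : Int) + ((decide (s > 80)).toNat : Int)

-- ===== PRECONDITION & SPEC =====
def Spec_caught_speeding (speed : Int) (is_birthday : Bool) (out : Int) : Prop := out = caught_speeding_alt speed is_birthday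
instance (speed : Int) (is_birthday : Bool) (out : Int) : Decidable (Spec_caught_speeding speed is_birthday out) := by unfold Spec_caught_speeding; infer_instance

-- ===== CLAIM =====
def Claim_equal_caught_speeding : Prop := ∀ (speed : Int) (is_birthday : Bool), Dom_caught_speeding speed is_birthday → Spec_caught_speeding speed is_birthday (caught_speeding speed is_birthday)

-- ===== LEMMAS AND PROOFS =====
theorem decide_toNat_int (p : Prop) [Decidable p] :
    (((decide p).toNat : Nat) : Int) = if p then 1 else 0 := by
  by_cases h : p <;> simp [h]

-- ===== VERDICT =====
theorem caught_speeding_spec : Claim_equal_caught_speeding := by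
  intro speed is_birthday _
  cases is_birthday <;>
    simp only [Spec_caught_speeding, caught_speeding, caught_speeding_alt,
      decide_toNat_int, if_true, if_false, Bool.false_eq_true, reduceIte] <;>
    split_ifs <;> omega
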